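-- pv_equiv track=rewrite | github.com/tim-inzitari/abs-bot | app/analytics.py | _chunk_name_lines
-- ===== SOURCE A (Python) =====
-- from typing import Any, Dict, List, Optional, Set, Tuple
--
-- def _chunk_name_lines(names: List[str], max_lines: int = 2, max_chars: int = 110) -> List[str]:
--     if not names:
--         return []
--
--     lines: List[str] = []
--     current = ""
--     omitted = 0
--
--     for index, name in enumerate(names):
--         candidate = f"{current} | {name}" if current else name
--         if len(candidate) <= max_chars:
--             current = candidate
--             continue
--
--         if current:
--             lines.append(current)
--         current = name
--
--         if len(lines) == max_lines:
--             omitted = len(names) - index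
--             current = ""
--             break
--
--     if current and len(lines) < max_lines:
--         lines.append(current)
--
--     if omitted:
--         suffix = f"... +{omitted} more"
--         if lines:
--             base = lines[-1]
--             if len(base) + 1 + len(suffix) <= max_chars:
--                 lines[-1] = f"{base} {suffix}"
--             else:
--                 lines[-1] = f"{base[: max(0, max_chars - len(suffix) - 1)]} {suffix}".rstrip()
--         else:
--             lines.append(suffix)
--
--     return lines[:max_lines]
-- ===== SOURCE B (Python) =====
-- from bisect import bisect_right
-- from typing import List
--
--
-- def _chunk_name_lines(names: List[str], max_lines: int = 2, max_chars: int = 110) -> List[str]: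
--     if not names:
--         return []
--     if max_lines <= 0:
--         return []
--
--     # Prefix sums: pref[k] = sum over the first k names of (len(name) + len(" | ")),
--     # so a rendered line holding names[t:e] has width pref[e] - pref[t] - 3.
--     n = len(names)
--     pref = [0]
--     for name in names:
--         pref.append(pref[-1] + len(name) + 3)
--
--     # Line boundaries by binary search. A line starting at i first skips leading empty
--     # names (they render nothing), then from the first nonempty name t extends to the
--     # largest e with pref[e] <= pref[t] + max_chars + 3, but always at least one name.
--     starts = [0]           # segment starts (= flush positions), for the omitted count
--     bounds = []            # (t, e) rendered span of each line, in order
--     i = 0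
--     while True:
--         t = i
--         while t < n and not names[t]:
--             t += 1
--         if t == n:
--             break
--         j = bisect_right(pref, pref[t] + max_chars + 3)
--         e = max(j - 1, t + 1)
--         bounds.append((t, e))
--         if e >= n:
--             break
--         starts.append(e)
--         i = e
--
--     omitted = n - starts[max_lines] if len(starts) > max_lines else 0
--     lines = [" | ".join(names[t:e]) for t, e in bounds[:max_lines]]
--
--     if omitted:
--         suffix = f"... +{omitted} more"
--         base = lines[-1]
--         if len(base) + 1 + len(suffix) <= max_chars:
--             lines[-1] = f"{base} {suffix}"
--         else:
--             lines[-1] = f"{base[: max(0, max_chars - len(suffix) - 1)]} {suffix}".rstrip()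
--     return lines
-- ===== Notes on version B (the rewrite author's own statement) =====
-- stated objective: faster
-- what changed: A packs names by re-growing a candidate string name-by-name (copying the whole current line per name) in one stateful loop with an early break; B never grows candidates: it precomputes a prefix-sum array of name widths, finds each line's boundary by binary search (bisect_right) over that array (skipping leading empty names, which render nothing), joins each kept line once, and derives the omitted count from the recorded flush positions.
-- outside the precondition, e.g. on _chunk_name_lines(['a', 'b', 'c'], -1, 1): A returns ['a'], B returns []
import Mathlib
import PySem

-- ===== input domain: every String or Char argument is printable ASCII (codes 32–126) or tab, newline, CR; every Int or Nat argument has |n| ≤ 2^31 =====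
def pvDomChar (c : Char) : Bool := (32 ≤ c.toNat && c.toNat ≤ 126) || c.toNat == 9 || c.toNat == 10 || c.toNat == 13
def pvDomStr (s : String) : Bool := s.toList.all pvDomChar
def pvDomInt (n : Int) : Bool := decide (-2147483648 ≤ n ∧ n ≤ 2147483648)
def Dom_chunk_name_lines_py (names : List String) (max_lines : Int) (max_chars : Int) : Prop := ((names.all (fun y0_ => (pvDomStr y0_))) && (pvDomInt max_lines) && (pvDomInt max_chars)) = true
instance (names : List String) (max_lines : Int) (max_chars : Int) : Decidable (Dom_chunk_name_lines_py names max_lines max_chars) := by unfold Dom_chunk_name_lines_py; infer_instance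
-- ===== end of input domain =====

-- B replaces A's single stateful packing loop (which re-grows a candidate string per name)
-- by a prefix-sum array of name widths with binary-search (bisect_right) line boundaries and
-- one join per kept line; objective: faster (measured).

-- ===== PORT A =====
-- A's for-loop over enumerate(names): state (lines, current); returns (lines, current, omitted)
-- at loop end or at the break (where Python sets current = "" and omitted = len(names) - index).
def pyA_loop (max_lines max_chars total : Int) :
    List String → Int → List String → String → (List String × String × Int)
  | [], _, lines, current => (lines, current, 0)
  | name :: rest, index, lines, current =>
      let candidate := if current ≠ "" then current ++ " | " ++ name else name
      if PySem.Str.len candidate ≤ max_chars then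
        pyA_loop max_lines max_chars total rest (index + 1) lines candidate
      else
        let lines' := if current ≠ "" then lines ++ [current] else lines
        if (lines'.length : Int) = max_lines then
          (lines', "", total - index)
        else
          pyA_loop max_lines max_chars total rest (index + 1) lines' name

-- A's "if omitted:" suffix block (lines[-1] is read/written only when lines ≠ []).
def pySuffixA (lines : List String) (omitted max_chars : Int) : List String :=
  let suffix := "... +" ++ PySem.Int.toStr omitted ++ " more"
  if lines ≠ [] then
    let base := PySem.List.pyGetD lines (-1) ""   -- lines[-1]; lines ≠ [] here
    if PySem.Str.len base + 1 + PySem.Str.len suffix ≤ max_chars then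
      lines.dropLast ++ [base ++ " " ++ suffix]
    else
      lines.dropLast ++
        [PySem.Str.rstrip
          (PySem.Str.slice base none (some (max 0 (max_chars - PySem.Str.len suffix - 1))) ++ " " ++ suffix)]
  else
    lines ++ [suffix]

def chunk_name_lines_py (names : List String) (max_lines : Int) (max_chars : Int) : List String :=
  if names = [] then [] else
  let r := pyA_loop max_lines max_chars (names.length : Int) names 0 [] ""
  let lines := r.1
  let current := r.2.1
  let omitted := r.2.2
  let lines := if current ≠ "" ∧ (lines.length : Int) < max_lines then lines ++ [current] else lines
  let lines := if omitted ≠ 0 then pySuffixA lines omitted max_chars else lines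
  PySem.List.slice lines none (some max_lines)   -- lines[:max_lines]

-- ===== PORT B =====
-- B's prefix loop: pref.append(pref[-1] + len(name) + 3).
def pyB_pref : List String → List Int → List Int
  | [], pref => pref
  | name :: rest, pref =>
      pyB_pref rest (pref ++ [PySem.List.pyGetD pref (-1) 0 + PySem.Str.len name + 3])

-- B's inner while: skip empty names (loop indices are nonnegative Python ints, ported as Nat).
def pyB_skip (names : List String) (n : Nat) (t : Nat) : Nat :=
  if h : t < n ∧ names.getD t "" = "" then pyB_skip names n (t + 1) else t
termination_by n - t
decreasing_by omega

-- the skip index never moves left (cited by pyB_loop's termination proof)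
theorem pyB_skip_ge (names : List String) (n t : Nat) : t ≤ pyB_skip names n t := by
  rw [pyB_skip]
  split_ifs with h
  · have := pyB_skip_ge names n (t + 1)
    omega
  · exact le_rfl
termination_by n - t
decreasing_by omega

-- B's outer while True: per line, skip empties, bisect the boundary, record (t, e) and the
-- flush position e; Python's max(j - 1, t + 1) agrees with the Nat computation since
-- j - 1 is only taken when it exceeds t + 1 ≥ 1.
def pyB_loop (names : List String) (pref : List Int) (max_chars : Int) (n : Nat)
    (i : Nat) (starts : List Nat) (bounds : List (Nat × Nat)) : List Nat × List (Nat × Nat) :=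
  let t := pyB_skip names n i
  if ht : t < n then
    let j := PySem.List.bisectRight pref (PySem.List.pyGetD pref (t : Int) 0 + max_chars + 3)
    let e := max (j - 1) (t + 1)
    if he : e < n then
      pyB_loop names pref max_chars n e (starts ++ [e]) (bounds ++ [(t, e)])
    else (starts, bounds ++ [(t, e)])
  else (starts, bounds)
termination_by n - i
decreasing_by
  have h1 := pyB_skip_ge names n i
  have h2 : pyB_skip names n i + 1 ≤
      max (PySem.List.bisectRight pref
            (PySem.List.pyGetD pref ((pyB_skip names n i : Nat) : Int) 0 + max_chars + 3) - 1)
        (pyB_skip names n i + 1) := le_max_right _ _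
  omega

-- B's "if omitted:" suffix block (B reads lines[-1] unconditionally).
def pySuffixB (lines : List String) (omitted max_chars : Int) : List String :=
  let suffix := "... +" ++ PySem.Int.toStr omitted ++ " more"
  let base := PySem.List.pyGetD lines (-1) ""   -- lines[-1]; lines ≠ [] whenever omitted ≠ 0
  if PySem.Str.len base + 1 + PySem.Str.len suffix ≤ max_chars then
    lines.dropLast ++ [base ++ " " ++ suffix]
  else
    lines.dropLast ++
      [PySem.Str.rstrip
        (PySem.Str.slice base none (some (max 0 (max_chars - PySem.Str.len suffix - 1))) ++ " " ++ suffix)]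

def chunk_name_lines_py_alt (names : List String) (max_lines : Int) (max_chars : Int) : List String :=
  if names = [] then [] else
  if max_lines ≤ 0 then [] else
  let n := names.length
  let pref := pyB_pref names [0]
  let r := pyB_loop names pref max_chars n 0 [0] []
  let omitted : Int :=
    if (r.1.length : Int) > max_lines then (n : Int) - (PySem.List.pyGetD r.1 max_lines 0 : Nat) else 0
  let lines := (PySem.List.slice r.2 none (some max_lines)).map
      (fun p => PySem.Str.join " | " (PySem.List.slice names (some (p.1 : Int)) (some (p.2 : Int))))
  if omitted ≠ 0 then pySuffixB lines omitted max_chars else lines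

-- ===== PRECONDITION & SPEC =====
-- Pre_ excludes negative max_lines only: a negative line budget is outside the task's
-- natural domain (A's value there comes from Python's negative-slice truncation of its
-- line list; B returns []).
def Pre_chunk_name_lines_py (names : List String) (max_lines : Int) (max_chars : Int) : Prop :=
  0 ≤ max_lines
instance (names : List String) (max_lines : Int) (max_chars : Int) : Decidable (Pre_chunk_name_lines_py names max_lines max_chars) := by unfold Pre_chunk_name_lines_py; infer_instance

def pvWitness_chunk_name_lines_py : List String × Int × Int := (["alpha", "beta", "gamma"], 2, 11)

def Spec_chunk_name_lines_py (names : List String) (max_lines : Int) (max_chars : Int) (out : List String) : Prop := out = chunk_name_lines_py_alt names max_lines max_chars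
instance (names : List String) (max_lines : Int) (max_chars : Int) (out : List String) : Decidable (Spec_chunk_name_lines_py names max_lines max_chars out) := by unfold Spec_chunk_name_lines_py; infer_instance

-- ===== CLAIM (what is proved, stated in full; the proofs are below) =====
def Claim_equal_chunk_name_lines_py : Prop := ∀ (names : List String) (max_lines : Int) (max_chars : Int), Dom_chunk_name_lines_py names max_lines max_chars → Pre_chunk_name_lines_py names max_lines max_chars → Spec_chunk_name_lines_py names max_lines max_chars (chunk_name_lines_py names max_lines max_chars)

-- ===== LEMMAS AND PROOFS =====

-- ---- proof-only reference: A's packing restated as an unlimited greedy pack ----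
-- (packed lines, recorded start index of each new line, the open line).
def pyB_pack (max_chars : Int) :
    List String → Int → String → List String → List Int → (List String × List Int × String)
  | [], _, current, packed, cuts => (packed, cuts, current)
  | name :: rest, index, current, packed, cuts =>
      let candidate := if current ≠ "" then current ++ " | " ++ name else name
      if PySem.Str.len candidate ≤ max_chars then
        pyB_pack max_chars rest (index + 1) candidate packed cuts
      else if current ≠ "" then
        pyB_pack max_chars rest (index + 1) name (packed ++ [current]) (cuts ++ [index])
      else
        pyB_pack max_chars rest (index + 1) name packed cuts

-- proof-only: the pack-based pipeline that bridges A and B.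
def packBased (names : List String) (max_lines : Int) (max_chars : Int) : List String :=
  if names = [] then [] else
  if max_lines ≤ 0 then [] else
  let r := pyB_pack max_chars names 0 "" [] []
  let packed := r.1 ++ (if r.2.2 ≠ "" then [r.2.2] else [])
  let cuts := r.2.1
  let omitted : Int :=
    if (cuts.length : Int) ≥ max_lines then
      (names.length : Int) - PySem.List.pyGetD cuts (max_lines - 1) 0
    else 0
  let lines := PySem.List.slice packed none (some max_lines)
  if omitted ≠ 0 then pySuffixA lines omitted max_chars else lines

theorem pySuffixA_length (lines : List String) (omitted max_chars : Int)
    (h : lines ≠ []) : (pySuffixA lines omitted max_chars).length = lines.length := by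
  unfold pySuffixA
  simp only [h, ne_eq, not_false_eq_true, if_true]
  split_ifs <;>
    simp [List.length_append, List.length_dropLast, Nat.sub_add_cancel (List.length_pos_of_ne_nil h)]

theorem pySuffixAB (lines : List String) (omitted max_chars : Int) (h : lines ≠ []) :
    pySuffixA lines omitted max_chars = pySuffixB lines omitted max_chars := by
  unfold pySuffixA pySuffixB
  simp only [h, ne_eq, not_false_eq_true, if_true]

-- pyB_pack only appends to packed and cuts, one element to each at the same steps.
theorem pack_prefix (max_chars : Int) :
    ∀ (rest : List String) (index : Int) (current : String) (packed : List String) (cuts : List Int),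
    ∃ tP tK, (pyB_pack max_chars rest index current packed cuts).1 = packed ++ tP ∧
      (pyB_pack max_chars rest index current packed cuts).2.1 = cuts ++ tK ∧
      tP.length = tK.length
  | [], _, current, packed, cuts => ⟨[], [], by simp [pyB_pack]⟩
  | name :: rest, index, current, packed, cuts => by
      simp only [pyB_pack]
      by_cases hfit : PySem.Str.len (if current ≠ "" then current ++ " | " ++ name else name) ≤ max_chars
      · rw [if_pos hfit]
        exact pack_prefix max_chars rest (index + 1) _ packed cuts
      · rw [if_neg hfit]
        by_cases hc : current ≠ ""
        · rw [if_pos hc]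
          obtain ⟨tP, tK, h1, h2, h3⟩ :=
            pack_prefix max_chars rest (index + 1) name (packed ++ [current]) (cuts ++ [index])
          exact ⟨current :: tP, index :: tK, by simp [h1], by simp [h2], by simp [h3]⟩
        · rw [if_neg hc]
          exact pack_prefix max_chars rest (index + 1) name packed cuts

-- Main invariant bridging A and the pack: below max_lines lines the two walk in lockstep;
-- when A breaks, A's lines are the first max_lines of the full packing and A's omitted
-- count is names-total minus the cut index recorded for that flush.
theorem loop_pack (max_lines max_chars total : Int) :
    ∀ (rest : List String) (index : Int) (lines : List String) (cuts : List Int) (current : String),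
    cuts.length = lines.length → (lines.length : Int) < max_lines →
    ((pyB_pack max_chars rest index current lines cuts).1.length =
        (pyB_pack max_chars rest index current lines cuts).2.1.length ∧
     ((((pyB_pack max_chars rest index current lines cuts).2.1.length : Int) ≥ max_lines ∧
        (pyA_loop max_lines max_chars total rest index lines current).1 =
          (pyB_pack max_chars rest index current lines cuts).1.take max_lines.toNat ∧
        (pyA_loop max_lines max_chars total rest index lines current).2.1 = "" ∧
        (pyA_loop max_lines max_chars total rest index lines current).2.2 =
          total - PySem.List.pyGetD (pyB_pack max_chars rest index current lines cuts).2.1 (max_lines - 1) 0) ∨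
      (((pyB_pack max_chars rest index current lines cuts).2.1.length : Int) < max_lines ∧
        (pyA_loop max_lines max_chars total rest index lines current).1 =
          (pyB_pack max_chars rest index current lines cuts).1 ∧
        (pyA_loop max_lines max_chars total rest index lines current).2.1 =
          (pyB_pack max_chars rest index current lines cuts).2.2 ∧
        (pyA_loop max_lines max_chars total rest index lines current).2.2 = 0)))
  | [], index, lines, cuts, current => by
      intro hc hlen
      simp only [pyA_loop, pyB_pack]
      exact ⟨hc.symm, Or.inr (by simp [hc]; omega)⟩
  | name :: rest, index, lines, cuts, current => by
      intro hc hlen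
      simp only [pyA_loop, pyB_pack]
      by_cases hfit : PySem.Str.len (if current ≠ "" then current ++ " | " ++ name else name) ≤ max_chars
      · rw [if_pos hfit, if_pos hfit]
        exact loop_pack max_lines max_chars total rest (index + 1) lines cuts _ hc hlen
      · rw [if_neg hfit, if_neg hfit]
        by_cases hcur : current ≠ ""
        · rw [if_pos hcur, if_pos hcur]
          by_cases hbrk : (((lines ++ [current]).length : Int) = max_lines)
          · rw [if_pos hbrk]
            obtain ⟨tP, tK, h1, h2, h3⟩ :=
              pack_prefix max_chars rest (index + 1) name (lines ++ [current]) (cuts ++ [index])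
            have hlines1 : (lines ++ [current]).length = max_lines.toNat := by
              simp at hbrk ⊢; omega
            have hK : (pyB_pack max_chars rest (index + 1) name (lines ++ [current]) (cuts ++ [index])).2.1.length
                = cuts.length + 1 + tK.length := by rw [h2]; simp; omega
            refine ⟨by rw [h1, h2]; simp [hc, h3], Or.inl ⟨?_, ?_, rfl, ?_⟩⟩
            · rw [hK]; simp at hbrk; omega
            · rw [h1, ← hlines1, List.take_left]
            · have hidx : max_lines - 1 = ((cuts.length : Nat) : Int) := by
                simp at hbrk; omega
              rw [h2, hidx, List.append_assoc, List.singleton_append,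
                PySem.List.pyGetD_natCast]
              simp
          · rw [if_neg hbrk]
            exact loop_pack max_lines max_chars total rest (index + 1) (lines ++ [current])
              (cuts ++ [index]) name (by simp [hc]) (by simp at hbrk ⊢; omega)
        · rw [if_neg hcur, if_neg hcur]
          have hbrk : ¬ ((lines.length : Int) = max_lines) := by omega
          rw [if_neg hbrk]
          exact loop_pack max_lines max_chars total rest (index + 1) lines cuts name hc hlen

-- A equals the pack-based pipeline on 0 ≤ max_lines (adapted final proof of the A-side).
theorem A_eq_packBased (names : List String) (max_lines max_chars : Int) (hpre : 0 ≤ max_lines) :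
    chunk_name_lines_py names max_lines max_chars = packBased names max_lines max_chars := by
  by_cases hn : names = []
  · simp [chunk_name_lines_py, packBased, hn]
  · by_cases h0 : max_lines ≤ 0
    · have h00 : max_lines = 0 := le_antisymm h0 hpre
      subst h00
      simp [chunk_name_lines_py, packBased, hn, PySem.List.slice_to]
    · have hm : 1 ≤ max_lines := by omega
      obtain ⟨hPK, hcase⟩ :=
        loop_pack max_lines max_chars (names.length : Int) names 0 [] [] "" rfl (by simpa using hm)
      simp only [chunk_name_lines_py, packBased, if_neg hn, if_neg h0]
      rcases hcase with ⟨hKge, h1, h2, h3⟩ | ⟨hKlt, h1, h2, h3⟩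
      · -- A broke: its lines are the first max_lines of B's full packing
        rw [h1, h2, h3, if_pos hKge]
        have hlenP : max_lines.toNat ≤ (pyB_pack max_chars names 0 "" [] []).1.length := by
          rw [hPK]; omega
        simp only [ne_eq, not_true_eq_false, false_and, if_false]
        simp only [PySem.List.slice_to _ hpre, List.take_append_of_le_length hlenP]
        have hLlen : ((pyB_pack max_chars names 0 "" [] []).1.take max_lines.toNat).length
            = max_lines.toNat := by simp [hlenP]
        have hne : (pyB_pack max_chars names 0 "" [] []).1.take max_lines.toNat ≠ [] := by
          intro hnil; rw [hnil] at hLlen; simp at hLlen; omega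
        split_ifs with hω
        · exact List.take_of_length_le (le_of_eq hLlen)
        · exact List.take_of_length_le (le_of_eq (by rw [pySuffixA_length _ _ _ hne, hLlen]))
      · -- no break: A's finished lines (plus trailing current) are exactly B's packing
        have hKn : ¬ (((pyB_pack max_chars names 0 "" [] []).2.1.length : Int) ≥ max_lines) :=
          not_le.mpr hKlt
        rw [h1, h2, h3, if_neg hKn]
        rw [if_neg (by simp : ¬ ((0:Int) ≠ 0)), if_neg (by simp : ¬ ((0:Int) ≠ 0))]
        congr 1
        by_cases hc' : (pyB_pack max_chars names 0 "" [] []).2.2 = ""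
        · simp [hc']
        · rw [if_pos ⟨hc', by rw [hPK]; exact hKlt⟩, if_pos hc']

-- ---- the prefix-sum array ----
def prefTail : List String → Int → List Int
  | [], _ => []
  | nm :: rest, v => (v + PySem.Str.len nm + 3) :: prefTail rest (v + PySem.Str.len nm + 3)

theorem pyB_pref_eq : ∀ (rest : List String) (acc : List Int) (v : Int),
    pyB_pref rest (acc ++ [v]) = acc ++ v :: prefTail rest v
  | [], acc, v => by simp [pyB_pref, prefTail]
  | nm :: rest, acc, v => by
      have hlast : PySem.List.pyGetD (acc ++ [v]) (-1) 0 = v := by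
        simp [PySem.List.pyGetD, PySem.List.pyGet?, PySem.List.pyIdx?]
      simp only [pyB_pref, hlast]
      have := pyB_pref_eq rest (acc ++ [v]) (v + PySem.Str.len nm + 3)
      simpa [prefTail] using this

theorem prefTail_length : ∀ (rest : List String) (v : Int), (prefTail rest v).length = rest.length
  | [], _ => rfl
  | nm :: rest, v => by simp [prefTail, prefTail_length rest]

theorem prefTail_pairwise : ∀ (rest : List String) (v : Int),
    List.Pairwise (· < ·) (v :: prefTail rest v)
  | [], v => by simp [prefTail]
  | nm :: rest, v => by
      have ih := prefTail_pairwise rest (v + PySem.Str.len nm + 3)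
      have hlt : v < v + PySem.Str.len nm + 3 := by
        have : 0 ≤ PySem.Str.len nm := by rw [PySem.Str.len_eq]; positivity
        omega
      refine List.pairwise_cons.mpr ⟨?_, ?_⟩
      · intro x hx
        simp only [prefTail, List.mem_cons] at hx
        rcases hx with rfl | hx
        · exact hlt
        · exact lt_trans hlt ((List.pairwise_cons.mp ih).1 x hx)
      · exact ih

theorem prefTail_getD_succ : ∀ (rest : List String) (v : Int) (k : Nat), k < rest.length →
    (v :: prefTail rest v).getD (k + 1) 0 =
      (v :: prefTail rest v).getD k 0 + PySem.Str.len (rest.getD k "") + 3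
  | [], _, k, h => by simp at h
  | nm :: rest, v, 0, _ => by simp [prefTail]
  | nm :: rest, v, (k+1), h => by
      have := prefTail_getD_succ rest (v + PySem.Str.len nm + 3) k (by simpa using h)
      simpa [prefTail] using this

theorem pref_eq (names : List String) : pyB_pref names [0] = 0 :: prefTail names 0 := by
  simpa using pyB_pref_eq names [] 0

-- proof-only shorthand for the prefix-sum value at index k.
def P (names : List String) (k : Nat) : Int := (0 :: prefTail names 0).getD k 0

theorem pref_length (names : List String) :
    (0 :: prefTail names 0).length = names.length + 1 := by
  simp [prefTail_length]

theorem P_succ (names : List String) (k : Nat) (h : k < names.length) :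
    P names (k + 1) = P names k + PySem.Str.len (names.getD k "") + 3 :=
  prefTail_getD_succ names 0 k h

theorem P_strict (names : List String) {i j : Nat} (hij : i < j) (hj : j ≤ names.length) :
    P names i < P names j := by
  have hp := prefTail_pairwise names 0
  rw [List.pairwise_iff_getElem] at hp
  have hi' : i < (0 :: prefTail names 0).length := by rw [pref_length]; omega
  have hj' : j < (0 :: prefTail names 0).length := by rw [pref_length]; omega
  have := hp i j hi' hj' hij
  unfold P
  rw [List.getD_eq_getElem _ _ hi', List.getD_eq_getElem _ _ hj']
  exact this

theorem P_mono (names : List String) {i j : Nat} (hij : i ≤ j) (hj : j ≤ names.length) :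
    P names i ≤ P names j := by
  rcases Nat.lt_or_ge i j with h | h
  · exact le_of_lt (P_strict names h hj)
  · have : i = j := le_antisymm hij h
    simp [this]

-- ---- segments and their joins ----
def segJoin (names : List String) (s e : Nat) : String :=
  PySem.Str.join " | " (PySem.List.slice names (some (s : Int)) (some (e : Int)))

theorem chars_join_snoc (sep y : List Char) : ∀ (l : List (List Char)), l ≠ [] →
    PySem.Chars.join sep (l ++ [y]) = PySem.Chars.join sep l ++ sep ++ y
  | [], h => absurd rfl h
  | [a], _ => by
      simp [PySem.Chars.join_cons_cons, PySem.Chars.join_singleton]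
  | a :: b :: rest, _ => by
      have ih := chars_join_snoc sep y (b :: rest) (by simp)
      simp only [List.cons_append] at ih ⊢
      rw [PySem.Chars.join_cons_cons, PySem.Chars.join_cons_cons, ih]
      simp [List.append_assoc]

theorem str_join_singleton (y : String) : PySem.Str.join " | " [y] = y := by
  rw [← String.toList_inj, PySem.Str.toList_join]
  simp [PySem.Chars.join_singleton]

theorem str_join_snoc (parts : List String) (y : String) (h : parts ≠ []) :
    PySem.Str.join " | " (parts ++ [y]) = PySem.Str.join " | " parts ++ " | " ++ y := by
  rw [← String.toList_inj, PySem.Str.toList_join]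
  simp only [List.map_append, List.map_cons, List.map_nil]
  rw [chars_join_snoc _ _ _ (by simpa using h)]
  simp [String.toList_append, PySem.Str.toList_join]

theorem segJoin_single (names : List String) (s : Nat) (h : s < names.length) :
    segJoin names s (s + 1) = names.getD s "" := by
  unfold segJoin
  rw [PySem.List.slice_natCast]
  rw [List.drop_eq_getElem_cons h]
  simp only [Nat.add_sub_cancel_left, List.take_succ_cons, List.take_zero]
  rw [str_join_singleton, List.getD_eq_getElem _ _ h]

theorem segJoin_snoc (names : List String) (s e : Nat) (hs : s < e) (he : e < names.length) :
    segJoin names s (e + 1) = segJoin names s e ++ " | " ++ names.getD e "" := by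
  unfold segJoin
  rw [PySem.List.slice_natCast, PySem.List.slice_natCast]
  have h1 : e + 1 - s = (e - s) + 1 := by omega
  have h2 : e - s < (names.drop s).length := by simp [List.length_drop]; omega
  rw [h1, List.take_succ_eq_append_getElem h2]
  have h3 : (names.drop s)[e - s] = names[e]'he := by
    rw [List.getElem_drop]
    congr 1
    omega
  rw [h3, str_join_snoc, List.getD_eq_getElem _ _ he]
  · intro hnil
    have := congrArg List.length hnil
    simp [List.length_take, List.length_drop] at this
    omega

theorem segJoin_len_aux (names : List String) : ∀ (d s : Nat), s + 1 + d ≤ names.length →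
    PySem.Str.len (segJoin names s (s + 1 + d)) = P names (s + 1 + d) - P names s - 3
  | 0, s, h => by
      rw [show s + 1 + 0 = s + 1 by ring, segJoin_single names s (by omega),
        P_succ names s (by omega)]
      ring
  | (d + 1), s, h => by
      have hlt : s + 1 + d < names.length := by omega
      rw [show s + 1 + (d + 1) = (s + 1 + d) + 1 by ring,
        segJoin_snoc names s (s + 1 + d) (by omega) hlt,
        PySem.Str.len_append, PySem.Str.len_append,
        segJoin_len_aux names d s (by omega), P_succ names _ hlt]
      have : PySem.Str.len " | " = 3 := by decide
      rw [this]
      ring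

theorem segJoin_len (names : List String) {s e : Nat} (hse : s < e) (he : e ≤ names.length) :
    PySem.Str.len (segJoin names s e) = P names e - P names s - 3 := by
  have : e = s + 1 + (e - s - 1) := by omega
  rw [this]
  exact segJoin_len_aux names (e - s - 1) s (by omega)

theorem str_len_pos {s : String} (h : s ≠ "") : 0 < PySem.Str.len s := by
  rw [PySem.Str.len_eq]
  have : s.toList ≠ [] := by
    intro hnil
    have h2 := congrArg String.ofList hnil
    rw [String.ofList_toList] at h2
    exact h (h2.trans (by decide))
  have := List.length_pos_of_ne_nil this
  omega

theorem segJoin_ne (names : List String) {s e : Nat} (hns : names.getD s "" ≠ "")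
    (hse : s < e) (he : e ≤ names.length) : segJoin names s e ≠ "" := by
  have hpos : 0 < PySem.Str.len (segJoin names s e) := by
    rw [segJoin_len names hse he]
    have h1 : P names (s + 1) = P names s + PySem.Str.len (names.getD s "") + 3 :=
      P_succ names s (by omega)
    have h2 : P names (s + 1) ≤ P names e := P_mono names (by omega) he
    have := str_len_pos hns
    omega
  intro hnil
  rw [hnil] at hpos
  have : PySem.Str.len "" = 0 := by decide
  omega

-- ---- the bisect-derived line end ----
theorem bisect_facts (names : List String) (mc : Int) (s : Nat) (hs : s < names.length) :
    (max (PySem.List.bisectRight (0 :: prefTail names 0) (P names s + mc + 3) - 1) (s + 1) ≤ names.length) ∧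
    (∀ m, s + 1 < m →
        m ≤ max (PySem.List.bisectRight (0 :: prefTail names 0) (P names s + mc + 3) - 1) (s + 1) →
        P names m ≤ P names s + mc + 3) ∧
    (max (PySem.List.bisectRight (0 :: prefTail names 0) (P names s + mc + 3) - 1) (s + 1) < names.length →
        P names s + mc + 3 <
          P names (max (PySem.List.bisectRight (0 :: prefTail names 0) (P names s + mc + 3) - 1) (s + 1) + 1)) := by
  set pref := 0 :: prefTail names 0 with hpref
  set x := P names s + mc + 3 with hx
  have hsorted : List.Pairwise (fun a b => a ≤ b) pref :=
    (prefTail_pairwise names 0).imp le_of_lt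
  obtain ⟨hle, hlt, hgt⟩ := PySem.List.bisectRight_spec pref x hsorted
  set j := PySem.List.bisectRight pref x with hj
  have hlen : pref.length = names.length + 1 := pref_length names
  refine ⟨by omega, ?_, ?_⟩
  · intro m hm1 hm2
    have hmj : m < j := by omega
    have hm' : m < pref.length := by omega
    have := hlt m hm' hmj
    unfold P
    rw [List.getD_eq_getElem _ _ (by rw [← hpref]; omega)]
    exact this
  · intro hlt'
    have hj' : j ≤ max (j - 1) (s + 1) + 1 := by omega
    have hm' : max (j - 1) (s + 1) + 1 < pref.length := by omega
    have := hgt (max (j - 1) (s + 1) + 1) hm' (by omega)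
    unfold P
    rw [List.getD_eq_getElem _ _ (by rw [← hpref]; omega)]
    exact this

-- ---- absorbing a whole line into the pack ----
theorem pack_absorb (names : List String) (mc : Int) (s : Nat)
    (hns : names.getD s "" ≠ "") (T : Int) (hT : T = P names s + mc + 3) :
    ∀ (d k : Nat), s < k → k + d ≤ names.length →
    (∀ m, s + 1 < m → m ≤ k + d → P names m ≤ T) →
    ∀ (packed : List String) (cuts : List Int),
    pyB_pack mc (names.drop k) (k : Int) (segJoin names s k) packed cuts =
      pyB_pack mc (names.drop (k + d)) ((k + d : Nat) : Int) (segJoin names s (k + d)) packed cuts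
  | 0, k, _, _, _, _, _ => by simp
  | (d + 1), k, hsk, hkd, hfits, packed, cuts => by
      have hk : k < names.length := by omega
      rw [List.drop_eq_getElem_cons hk]
      have hcur : segJoin names s k ≠ "" := segJoin_ne names hns hsk (by omega)
      have hcand : segJoin names s k ++ " | " ++ names[k] = segJoin names s (k + 1) := by
        rw [segJoin_snoc names s k hsk hk, List.getD_eq_getElem _ _ hk]
      simp only [pyB_pack, ne_eq, hcur, not_false_eq_true, if_true]
      rw [hcand]
      have hfit : PySem.Str.len (segJoin names s (k + 1)) ≤ mc := by
        rw [segJoin_len names (by omega) (by omega), hT] at *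
        have := hfits (k + 1) (by omega) (by omega)
        omega
      rw [if_pos hfit]
      have : (k : Int) + 1 = ((k + 1 : Nat) : Int) := by push_cast; ring
      rw [this]
      have := pack_absorb names mc s hns T hT d (k + 1) (by omega) (by omega)
        (fun m h1 h2 => hfits m h1 (by omega)) packed cuts
      rw [this]
      congr 2 <;> omega

-- ---- skip facts ----
theorem pyB_skip_le (names : List String) (n t : Nat) (h : t ≤ n) : pyB_skip names n t ≤ n := by
  rw [pyB_skip]
  split_ifs with hc
  · exact pyB_skip_le names n (t + 1) (by omega)
  · exact h
termination_by n - t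
decreasing_by omega

theorem pyB_skip_empty (names : List String) (n t m : Nat) (h1 : t ≤ m)
    (h2 : m < pyB_skip names n t) : names.getD m "" = "" := by
  rw [pyB_skip] at h2
  split_ifs at h2 with hc
  · by_cases hm : t = m
    · subst hm
      exact hc.2
    · exact pyB_skip_empty names n (t + 1) m (by omega) h2
  · omega

termination_by n - t
decreasing_by omega

theorem pyB_skip_nonempty (names : List String) (n t : Nat)
    (h : pyB_skip names n t < n) : names.getD (pyB_skip names n t) "" ≠ "" := by
  rw [pyB_skip] at h ⊢
  split_ifs at h ⊢ with hc
  · exact pyB_skip_nonempty names n (t + 1) h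
  · rw [not_and_or] at hc
    intro hemp
    rcases hc with hc | hc
    · omega
    · exact hc hemp
termination_by n - t
decreasing_by omega

-- ---- consuming empty names with an empty current is a no-op of the pack ----
theorem pack_skip (names : List String) (mc : Int) :
    ∀ (d k : Nat), k + d ≤ names.length →
    (∀ m, k ≤ m → m < k + d → names.getD m "" = "") →
    ∀ (packed : List String) (cuts : List Int),
    pyB_pack mc (names.drop k) (k : Int) "" packed cuts =
      pyB_pack mc (names.drop (k + d)) ((k + d : Nat) : Int) "" packed cuts
  | 0, k, _, _, packed, cuts => by simp
  | (d + 1), k, hkd, hemp, packed, cuts => by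
      have hk : k < names.length := by omega
      rw [List.drop_eq_getElem_cons hk]
      have h0 : names[k] = "" := by
        have := hemp k le_rfl (by omega)
        rwa [List.getD_eq_getElem _ _ hk] at this
      have hkk : k + (d + 1) = (k + 1) + d := by ring
      rw [hkk, h0]
      have hrec := pack_skip names mc d (k + 1) (by omega)
        (fun m h1 h2 => hemp m (by omega) (by omega)) packed cuts
      have hcast : ((k : Int) + 1) = ((k + 1 : Nat) : Int) := by push_cast; ring
      simp only [pyB_pack, ne_eq, not_true_eq_false, if_false, ite_self]
      rw [hcast, hrec]

-- ---- taking the first name of a line (current is empty either way afterwards) ----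
theorem pack_take (names : List String) (mc : Int) (k : Nat) (hk : k < names.length)
    (packed : List String) (cuts : List Int) :
    pyB_pack mc (names.drop k) (k : Int) "" packed cuts =
      pyB_pack mc (names.drop (k + 1)) ((k + 1 : Nat) : Int) (names.getD k "") packed cuts := by
  rw [List.drop_eq_getElem_cons hk, List.getD_eq_getElem _ _ hk]
  have hcast : ((k : Int) + 1) = ((k + 1 : Nat) : Int) := by push_cast; ring
  simp only [pyB_pack, ne_eq, not_true_eq_false, if_false, ite_self, hcast]

-- ---- accumulators of pyB_loop ----
theorem loop_acc (names : List String) (pref : List Int) (mc : Int) (n : Nat) (i : Nat)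
    (starts : List Nat) (bounds : List (Nat × Nat)) :
    pyB_loop names pref mc n i starts bounds =
      (starts ++ (pyB_loop names pref mc n i [] []).1,
       bounds ++ (pyB_loop names pref mc n i [] []).2) := by
  conv_lhs => rw [pyB_loop]
  conv_rhs => rw [pyB_loop]
  by_cases ht : pyB_skip names n i < n
  · simp only [dif_pos ht]
    by_cases he : max (PySem.List.bisectRight pref
        (PySem.List.pyGetD pref ((pyB_skip names n i : Nat) : Int) 0 + mc + 3) - 1)
        (pyB_skip names n i + 1) < n
    · simp only [dif_pos he]
      rw [loop_acc names pref mc n _ (starts ++ [_]) (bounds ++ [_]),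
          loop_acc names pref mc n _ ([] ++ [_]) ([] ++ [_])]
      simp
    · simp only [dif_neg he]
      simp
  · simp only [dif_neg ht]
    simp
termination_by n - i
decreasing_by
  all_goals
    have h1 := pyB_skip_ge names n i
  all_goals omega

theorem loop_lens (names : List String) (pref : List Int) (mc : Int) (n : Nat) (i : Nat) :
    (pyB_loop names pref mc n i [] []).1.length ≤ (pyB_loop names pref mc n i [] []).2.length := by
  conv_lhs => rw [pyB_loop]
  conv_rhs => rw [pyB_loop]
  by_cases ht : pyB_skip names n i < n
  · simp only [dif_pos ht]
    by_cases he : max (PySem.List.bisectRight pref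
        (PySem.List.pyGetD pref ((pyB_skip names n i : Nat) : Int) 0 + mc + 3) - 1)
        (pyB_skip names n i + 1) < n
    · simp only [dif_pos he]
      rw [loop_acc names pref mc n _ ([] ++ [_]) ([] ++ [_])]
      have := loop_lens names pref mc n
        (max (PySem.List.bisectRight pref
          (PySem.List.pyGetD pref ((pyB_skip names n i : Nat) : Int) 0 + mc + 3) - 1)
          (pyB_skip names n i + 1))
      simp only [List.nil_append, List.singleton_append, List.length_cons]
      omega
    · simp only [dif_neg he]
      simp
  · simp only [dif_neg ht]
    simp
termination_by n - i
decreasing_by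
  all_goals
    have h1 := pyB_skip_ge names n i
  all_goals omega
theorem loop_end (names : List String) (pref : List Int) (mc : Int) :
    pyB_loop names pref mc names.length names.length [] [] = ([], []) := by
  rw [pyB_loop]
  have hsk : pyB_skip names names.length names.length = names.length := by
    rw [pyB_skip]
    simp
  simp [hsk]

-- ---- the main correspondence: the greedy pack equals the bisect segmentation ----
theorem seg_main (names : List String) (mc : Int) :
    ∀ (fuel s : Nat), names.length - s ≤ fuel → s ≤ names.length →
    ∀ (packed : List String) (cuts : List Int),
    ((pyB_pack mc (names.drop s) ((s : Nat) : Int) "" packed cuts).1 ++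
        (if (pyB_pack mc (names.drop s) ((s : Nat) : Int) "" packed cuts).2.2 ≠ "" then
          [(pyB_pack mc (names.drop s) ((s : Nat) : Int) "" packed cuts).2.2] else []) =
      packed ++ ((pyB_loop names (0 :: prefTail names 0) mc names.length s [] []).2).map
          (fun p => segJoin names p.1 p.2)) ∧
    ((pyB_pack mc (names.drop s) ((s : Nat) : Int) "" packed cuts).2.1 =
      cuts ++ ((pyB_loop names (0 :: prefTail names 0) mc names.length s [] []).1).map
        (fun k : Nat => (k : Int))) := by
  intro fuel
  induction fuel with
  | zero =>
    intro s hfuel hs packed cuts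
    have hsn : s = names.length := by omega
    subst hsn
    rw [List.drop_length, loop_end]
    simp [pyB_pack]
  | succ fuel ih =>
    intro s hfuel hs packed cuts
    by_cases hsn : s = names.length
    · subst hsn
      rw [List.drop_length, loop_end]
      simp [pyB_pack]
    · have hs' : s < names.length := by omega
      have ht_ge := pyB_skip_ge names names.length s
      have ht_le := pyB_skip_le names names.length s (by omega)
      have hskip := pack_skip names mc (pyB_skip names names.length s - s) s
        (by omega) (fun m h1 h2 => pyB_skip_empty names names.length s m h1 (by omega)) packed cuts
      rw [show s + (pyB_skip names names.length s - s) = pyB_skip names names.length s from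
        by omega] at hskip
      set t := pyB_skip names names.length s with htdef
      rw [hskip]
      by_cases ht : t < names.length
      · have hne : names.getD t "" ≠ "" := pyB_skip_nonempty names names.length s ht
        obtain ⟨he_le, hfits, hstop⟩ := bisect_facts names mc t ht
        have htgt : PySem.List.pyGetD (0 :: prefTail names 0) (t : Int) 0 + mc + 3
            = P names t + mc + 3 := by
          rw [PySem.List.pyGetD_natCast]
          rfl
        set e := max (PySem.List.bisectRight (0 :: prefTail names 0) (P names t + mc + 3) - 1)
          (t + 1) with hedef
        rw [pack_take names mc t ht]
        have habs := pack_absorb names mc t hne (P names t + mc + 3) rfl (e - (t + 1)) (t + 1)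
          (by omega) (by omega) (fun m h1 h2 => hfits m h1 (by omega)) packed cuts
        rw [show t + 1 + (e - (t + 1)) = e from by omega] at habs
        have hstart : names.getD t "" = segJoin names t (t + 1) := (segJoin_single names t ht).symm
        rw [hstart, habs]
        by_cases he : e < names.length
        · have hloopstep : pyB_loop names (0 :: prefTail names 0) mc names.length s [] [] =
              (e :: (pyB_loop names (0 :: prefTail names 0) mc names.length e [] []).1,
               (t, e) :: (pyB_loop names (0 :: prefTail names 0) mc names.length e [] []).2) := by
            conv_lhs => rw [pyB_loop]
            simp only [← htdef, htgt, ← hedef, dif_pos ht, dif_pos he]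
            rw [loop_acc names (0 :: prefTail names 0) mc names.length e ([] ++ [e])
              ([] ++ [(t, e)])]
            simp
          rw [hloopstep]
          have hcur : segJoin names t e ≠ "" := segJoin_ne names hne (by omega) (by omega)
          rw [List.drop_eq_getElem_cons he]
          have hcand : segJoin names t e ++ " | " ++ names[e] = segJoin names t (e + 1) := by
            rw [segJoin_snoc names t e (by omega) he, List.getD_eq_getElem _ _ he]
          have hnofit : ¬ (PySem.Str.len (segJoin names t (e + 1)) ≤ mc) := by
            rw [segJoin_len names (by omega) (by omega)]
            have := hstop he
            omega
          simp only [pyB_pack, ne_eq, hcur, not_false_eq_true, if_true]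
          rw [hcand, if_neg hnofit]
          rw [show ((e : Int) + 1) = ((e + 1 : Nat) : Int) from by push_cast; ring]
          rw [show names[e] = names.getD e "" from (List.getD_eq_getElem _ _ he).symm]
          rw [← pack_take names mc e he]
          obtain ⟨ih1, ih2⟩ := ih e (by omega) (by omega) (packed ++ [segJoin names t e])
            (cuts ++ [(e : Int)])
          refine ⟨?_, ?_⟩
          · rw [ih1]
            simp [List.append_assoc]
          · rw [ih2]
            simp [List.append_assoc]
        · have hen : e = names.length := by omega
          have hloopstep : pyB_loop names (0 :: prefTail names 0) mc names.length s [] [] =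
              ([], [(t, e)]) := by
            conv_lhs => rw [pyB_loop]
            simp only [← htdef, htgt, ← hedef, dif_pos ht, dif_neg he]
            simp
          rw [hloopstep]
          have hcur : segJoin names t e ≠ "" := segJoin_ne names hne (by omega) (by omega)
          rw [hen, List.drop_length]
          rw [← hen] at *
          simp [pyB_pack, hcur]
      · have htn : t = names.length := by omega
        have hloop0 : pyB_loop names (0 :: prefTail names 0) mc names.length s [] [] =
            ([], []) := by
          conv_lhs => rw [pyB_loop]
          simp only [← htdef, dif_neg ht]
        rw [htn, List.drop_length, hloop0]
        simp [pyB_pack]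
-- the full pack of the whole list equals the bisect segmentation of the whole list
theorem pack_full (names : List String) (mc : Int) :
    ((pyB_pack mc names 0 "" [] []).1 ++
        (if (pyB_pack mc names 0 "" [] []).2.2 ≠ "" then
          [(pyB_pack mc names 0 "" [] []).2.2] else []) =
      ((pyB_loop names (0 :: prefTail names 0) mc names.length 0 [] []).2).map
        (fun p => segJoin names p.1 p.2)) ∧
    ((pyB_pack mc names 0 "" [] []).2.1 =
      ((pyB_loop names (0 :: prefTail names 0) mc names.length 0 [] []).1).map
        (fun k : Nat => (k : Int))) := by
  have := seg_main names mc names.length 0 (by omega) (by omega) [] []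
  simp only [List.drop_zero, Nat.cast_zero, List.nil_append] at this
  exact this

theorem packBased_eq_alt (names : List String) (ml mc : Int) (hml : 0 ≤ ml) :
    packBased names ml mc = chunk_name_lines_py_alt names ml mc := by
  by_cases hn : names = []
  · simp [packBased, chunk_name_lines_py_alt, hn]
  · by_cases h0 : ml ≤ 0
    · simp [packBased, chunk_name_lines_py_alt, hn, h0]
    · have hml1 : 1 ≤ ml := by omega
      set k := ml.toNat with hkdef
      have hk1 : 1 ≤ k := by omega
      have hmlk : ml = (k : Int) := by omega
      obtain ⟨h1, h2⟩ := pack_full names mc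
      have hlens := loop_lens names (0 :: prefTail names 0) mc names.length 0
      unfold packBased chunk_name_lines_py_alt
      simp only [if_neg hn, if_neg h0, pref_eq]
      rw [h1, h2]
      rw [loop_acc names (0 :: prefTail names 0) mc names.length 0 [0] []]
      have hfun : (fun (p : Nat × Nat) =>
            PySem.Str.join " | " (PySem.List.slice names (some (p.1 : Int)) (some (p.2 : Int)))) =
          (fun (p : Nat × Nat) => segJoin names p.1 p.2) := rfl
      rw [hfun]
      set S := (pyB_loop names (0 :: prefTail names 0) mc names.length 0 [] []).1 with hSdef
      set B := (pyB_loop names (0 :: prefTail names 0) mc names.length 0 [] []).2 with hBdef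
      simp only [List.nil_append]
      rw [PySem.List.slice_to _ hml, PySem.List.slice_to _ hml, ← List.map_take]
      have hcond : (((S.map (fun k : Nat => (k : Int))).length : Int) ≥ ml) ↔
          (((([0] ++ S) : List Nat).length : Int) > ml) := by
        simp only [List.length_map, List.length_append, List.length_cons, List.length_nil]
        omega
      have hO : (if (((S.map (fun k : Nat => (k : Int))).length : Int) ≥ ml) then
            (names.length : Int) -
              PySem.List.pyGetD (S.map (fun k : Nat => (k : Int))) (ml - 1) 0
          else 0) =
          (if (((([0] ++ S) : List Nat).length : Int) > ml) then
            (names.length : Int) - ((PySem.List.pyGetD (([0] ++ S) : List Nat) ml 0 : Nat) : Int)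
          else 0) := by
        by_cases hgt : (((([0] ++ S) : List Nat).length : Int) > ml)
        · rw [if_pos (hcond.mpr hgt), if_pos hgt]
          have hSk : k ≤ S.length := by
            simp only [List.length_append, List.length_cons, List.length_nil] at hgt
            omega
          have hlt1 : k - 1 < (S.map (fun k : Nat => (k : Int))).length := by
            simp only [List.length_map]
            omega
          have hltk : k < (([0] ++ S) : List Nat).length := by
            simp only [List.length_append, List.length_cons, List.length_nil]
            omega
          rw [show (ml - 1 : Int) = ((k - 1 : Nat) : Int) from by omega, PySem.List.pyGetD_natCast,
            hmlk, PySem.List.pyGetD_natCast]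
          rw [List.getD_eq_getElem _ _ hlt1, List.getElem_map,
            List.getD_eq_getElem _ _ hltk,
            List.getElem_append_right (by simp; omega)]
          simp
        · rw [if_neg (fun hcl => hgt (hcond.mp hcl)), if_neg hgt]
      rw [hO]
      by_cases hω : (if (((([0] ++ S) : List Nat).length : Int) > ml) then
          (names.length : Int) - ((PySem.List.pyGetD (([0] ++ S) : List Nat) ml 0 : Nat) : Int)
          else 0) ≠ 0
      · rw [if_pos hω, if_pos hω]
        have hgt : (((([0] ++ S) : List Nat).length : Int) > ml) := by
          by_contra hne
          exact hω (by rw [if_neg hne])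
        have hSk : k ≤ S.length := by
          simp only [List.length_append, List.length_cons, List.length_nil] at hgt
          omega
        have hLlen : ((List.take ml.toNat B).map (fun p => segJoin names p.1 p.2)).length
            = ml.toNat := by
          simp only [List.length_map, List.length_take]
          omega
        apply pySuffixAB
        intro hnil
        rw [hnil] at hLlen
        simp at hLlen
        omega
      · rw [if_neg hω, if_neg hω]

-- ===== VERDICT (by name: the statement is the Claim_ definition above) =====
theorem chunk_name_lines_py_spec : Claim_equal_chunk_name_lines_py := by
  intro names ml mc _ hpre
  unfold Spec_chunk_name_lines_py
  rw [A_eq_packBased names ml mc hpre]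
  exact packBased_eq_alt names ml mc hpre
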